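-- pv_equiv track=rewrite | github.com/dawidpawliczek4/UWr | discrete-mathematics/l9z11.py | has_source_vertex
-- ===== SOURCE A (Python) =====
-- def has_source_vertex(D):
--     n = len(D)  # Number of vertices
--
--     for i in range(n):
--         is_source = True
--
--         # Check outgoing edges in row i
--         for j in range(n):
--             if i != j and D[i][j] == 0:  # Must have outgoing edges to all other vertices
--                 is_source = False
--                 break
--
--         # Check no incoming edges in column i
--         for j in range(n):
--             if i != j and D[j][i] == 1:  # Must have no incoming edges
--                 is_source = False
--                 break
--
--         if is_source:
--             return True  # Source vertex found
--
--     return False  # No source vertex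
-- ===== SOURCE B (Python) =====
-- def has_source_vertex(D):
--     n = len(D)
--     # One pass over the matrix: no_in[i] stays True iff column i has no off-diagonal 1.
--     no_in = [True] * n
--     for j in range(n):
--         for i in range(n):
--             if i != j and D[j][i] == 1:
--                 no_in[i] = False
--     # A vertex is a source iff it has no incoming edge and every off-diagonal row entry is nonzero.
--     return any(no_in[i] and all(D[i][j] != 0 for j in range(n) if j != i)
--                for i in range(n))
-- ===== Notes on version B (the rewrite author's own statement) =====
-- stated objective: alternative
-- what changed: A re-scans a row and a column per candidate vertex with early exits; B makes one pass over the matrix computing a no-incoming-edge flag per vertex and then a single row pass combining the flag with an all-nonzero row check.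
-- outside the precondition, e.g. on has_source_vertex([[1, 1], [1]]): A returns False, B returns False; on has_source_vertex([[1, 1, 1, 1], [0, 2, 1, 2], [0, 0], [1, 0]]): A returns False, B raises IndexError
import Mathlib
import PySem

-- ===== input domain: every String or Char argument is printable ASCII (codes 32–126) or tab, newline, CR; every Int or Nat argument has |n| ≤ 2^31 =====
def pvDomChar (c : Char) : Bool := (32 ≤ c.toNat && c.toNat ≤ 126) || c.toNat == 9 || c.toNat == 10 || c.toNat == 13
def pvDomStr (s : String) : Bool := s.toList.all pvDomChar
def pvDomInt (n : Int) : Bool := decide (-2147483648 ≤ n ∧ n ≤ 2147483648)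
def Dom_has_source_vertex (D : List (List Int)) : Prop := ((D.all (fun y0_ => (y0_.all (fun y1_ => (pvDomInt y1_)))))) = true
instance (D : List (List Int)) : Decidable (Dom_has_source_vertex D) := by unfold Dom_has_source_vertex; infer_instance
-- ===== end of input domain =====

-- B replaces A's per-candidate row/column re-scans by one pass over the matrix computing a
-- no-incoming-edge flag per vertex followed by a single row pass (alternative structure, same O(n^2)).

-- ===== PORT A =====
-- 'for j in range(n): if i != j and D[i][j] == 0: is_source = False; break'
def aRowLoop (D : List (List Int)) (i : Int) : List Int → Bool
  | [] => true
  | j :: js =>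
    if i ≠ j ∧ PySem.List.pyGetD (PySem.List.pyGetD D i []) j 0 = 0 then false
    else aRowLoop D i js

-- 'for j in range(n): if i != j and D[j][i] == 1: is_source = False; break'
def aColLoop (D : List (List Int)) (i : Int) : List Int → Bool
  | [] => true
  | j :: js =>
    if i ≠ j ∧ PySem.List.pyGetD (PySem.List.pyGetD D j []) i 0 = 1 then false
    else aColLoop D i js

-- the outer 'for i in range(n)' with its early 'return True'
def aOuter (D : List (List Int)) : List Int → Bool
  | [] => false
  | i :: is =>
    if aRowLoop D i (PySem.List.pyRange 0 (PySem.List.len D) 1)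
       && aColLoop D i (PySem.List.pyRange 0 (PySem.List.len D) 1) then true
    else aOuter D is

def has_source_vertex (D : List (List Int)) : Bool :=
  aOuter D (PySem.List.pyRange 0 (PySem.List.len D) 1)

-- ===== PORT B =====
-- inner 'for i in range(n): if i != j and D[j][i] == 1: no_in[i] = False'
def bMarkRow (D : List (List Int)) (j : Int) : List Int → List Bool → List Bool
  | [], acc => acc
  | i :: is, acc =>
      bMarkRow D j is
        (if i ≠ j ∧ PySem.List.pyGetD (PySem.List.pyGetD D j []) i 0 = 1
         then PySem.List.pySetD acc i false else acc)

-- outer 'for j in range(n)'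
def bOuterMark (D : List (List Int)) : List Int → List Bool → List Bool
  | [], acc => acc
  | j :: js, acc =>
      bOuterMark D js (bMarkRow D j (PySem.List.pyRange 0 (PySem.List.len D) 1) acc)

-- 'all(D[i][j] != 0 for j in range(n) if j != i)'
def bRowOk (D : List (List Int)) (i : Int) : List Int → Bool
  | [] => true
  | j :: js =>
    (decide (j = i) || decide (PySem.List.pyGetD (PySem.List.pyGetD D i []) j 0 ≠ 0))
      && bRowOk D i js

-- 'any(no_in[i] and … for i in range(n))'
def bAny (D : List (List Int)) (flags : List Bool) : List Int → Bool
  | [] => false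
  | i :: is =>
    (PySem.List.pyGetD flags i false
       && bRowOk D i (PySem.List.pyRange 0 (PySem.List.len D) 1)) || bAny D flags is

def has_source_vertex_alt (D : List (List Int)) : Bool :=
  bAny D (bOuterMark D (PySem.List.pyRange 0 (PySem.List.len D) 1)
            (List.replicate D.length true))
    (PySem.List.pyRange 0 (PySem.List.len D) 1)

-- ===== PRECONDITION & SPEC =====
-- Pre_ requires every row to have at least n = len(D) entries (so every D[i][j], D[j][i] with
-- i, j < n that either program reads exists): on shorter rows A raises IndexError except when an
-- early break accidentally stops the scan first; those accidental returns are excluded (cited in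
-- the claim).  Entries beyond column n-1 are read by neither program.
def Pre_has_source_vertex (D : List (List Int)) : Prop :=
  ∀ row ∈ D, D.length ≤ row.length
instance (D : List (List Int)) : Decidable (Pre_has_source_vertex D) := by
  unfold Pre_has_source_vertex; infer_instance

def pvWitness_has_source_vertex : List (List Int) := [[1, 1], [0, 1]]

def Spec_has_source_vertex (D : List (List Int)) (out : Bool) : Prop := out = has_source_vertex_alt D
instance (D : List (List Int)) (out : Bool) : Decidable (Spec_has_source_vertex D out) := by unfold Spec_has_source_vertex; infer_instance

-- ===== CLAIM (what is proved, stated in full; the proofs are below) =====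
def Claim_equal_has_source_vertex : Prop := ∀ (D : List (List Int)), Dom_has_source_vertex D → Pre_has_source_vertex D → Spec_has_source_vertex D (has_source_vertex D)

-- ===== LEMMAS AND PROOFS =====

-- vertex i is a source (Nat-indexed specification both ports are reduced to;
-- entries are read with the same getD defaults the total ports use)
def isSrc (D : List (List Int)) (i : Nat) : Prop :=
  (∀ j < D.length, j ≠ i → (D.getD i []).getD j 0 ≠ 0) ∧
  (∀ j < D.length, j ≠ i → (D.getD j []).getD i 0 ≠ 1)

theorem aRowLoop_iff (D : List (List Int)) (i : Int) (js : List Int) :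
    aRowLoop D i js = true ↔
      ∀ j ∈ js, ¬(i ≠ j ∧ PySem.List.pyGetD (PySem.List.pyGetD D i []) j 0 = 0) := by
  induction js with
  | nil => simp [aRowLoop]
  | cons j js ih =>
    simp only [aRowLoop]
    by_cases h : i ≠ j ∧ PySem.List.pyGetD (PySem.List.pyGetD D i []) j 0 = 0
    · rw [if_pos h]
      exact iff_of_false (by simp) (fun hall => (hall j (by simp)) h)
    · rw [if_neg h, ih, List.forall_mem_cons]
      exact ⟨fun hall => ⟨h, hall⟩, fun hall => hall.2⟩

theorem aColLoop_iff (D : List (List Int)) (i : Int) (js : List Int) :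
    aColLoop D i js = true ↔
      ∀ j ∈ js, ¬(i ≠ j ∧ PySem.List.pyGetD (PySem.List.pyGetD D j []) i 0 = 1) := by
  induction js with
  | nil => simp [aColLoop]
  | cons j js ih =>
    simp only [aColLoop]
    by_cases h : i ≠ j ∧ PySem.List.pyGetD (PySem.List.pyGetD D j []) i 0 = 1
    · rw [if_pos h]
      exact iff_of_false (by simp) (fun hall => (hall j (by simp)) h)
    · rw [if_neg h, ih, List.forall_mem_cons]
      exact ⟨fun hall => ⟨h, hall⟩, fun hall => hall.2⟩

theorem aOuter_iff (D : List (List Int)) (is : List Int) :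
    aOuter D is = true ↔
      ∃ i ∈ is, aRowLoop D i (PySem.List.pyRange 0 (PySem.List.len D) 1) = true ∧
                aColLoop D i (PySem.List.pyRange 0 (PySem.List.len D) 1) = true := by
  induction is with
  | nil => simp [aOuter]
  | cons i is ih =>
    simp only [aOuter]
    by_cases h : (aRowLoop D i (PySem.List.pyRange 0 (PySem.List.len D) 1)
       && aColLoop D i (PySem.List.pyRange 0 (PySem.List.len D) 1)) = true
    · rw [if_pos h]
      simp only [Bool.and_eq_true] at h
      exact iff_of_true rfl ⟨i, by simp, h⟩
    · rw [if_neg h, ih]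
      constructor
      · rintro ⟨a, ha, hp⟩
        exact ⟨a, List.mem_cons_of_mem _ ha, hp⟩
      · rintro ⟨a, ha, hp⟩
        rcases List.mem_cons.mp ha with rfl | ha'
        · exact absurd (by simp only [Bool.and_eq_true]; exact hp) h
        · exact ⟨a, ha', hp⟩

theorem A_iff (D : List (List Int)) :
    has_source_vertex D = true ↔ ∃ i < D.length, isSrc D i := by
  unfold has_source_vertex
  rw [aOuter_iff]
  simp only [PySem.List.len_eq]
  constructor
  · rintro ⟨i, hi, hrow, hcol⟩
    rw [PySem.List.mem_pyRange_one] at hi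
    obtain ⟨hi0, hin⟩ := hi
    have hicast : i = ((i.toNat : Nat) : Int) := by omega
    refine ⟨i.toNat, by omega, ?_, ?_⟩
    · intro j hj hji h0
      have hmem : ((j : Nat) : Int) ∈ PySem.List.pyRange 0 (D.length : Int) 1 := by
        rw [PySem.List.mem_pyRange_one]; omega
      have hx := (aRowLoop_iff D i _).mp hrow _ hmem
      rw [hicast] at hx
      simp only [PySem.List.pyGetD_natCast] at hx
      exact hx ⟨by omega, h0⟩
    · intro j hj hji h1
      have hmem : ((j : Nat) : Int) ∈ PySem.List.pyRange 0 (D.length : Int) 1 := by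
        rw [PySem.List.mem_pyRange_one]; omega
      have hx := (aColLoop_iff D i _).mp hcol _ hmem
      rw [hicast] at hx
      simp only [PySem.List.pyGetD_natCast] at hx
      exact hx ⟨by omega, h1⟩
  · rintro ⟨k, hk, h1, h2⟩
    refine ⟨(k : Int), by rw [PySem.List.mem_pyRange_one]; omega, ?_, ?_⟩
    · rw [aRowLoop_iff]
      rintro j hjmem ⟨hne, h0⟩
      rw [PySem.List.mem_pyRange_one] at hjmem
      have hjcast : j = ((j.toNat : Nat) : Int) := by omega
      rw [hjcast] at h0
      simp only [PySem.List.pyGetD_natCast] at h0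
      exact h1 j.toNat (by omega) (by omega) h0
    · rw [aColLoop_iff]
      rintro j hjmem ⟨hne, hv⟩
      rw [PySem.List.mem_pyRange_one] at hjmem
      have hjcast : j = ((j.toNat : Nat) : Int) := by omega
      rw [hjcast] at hv
      simp only [PySem.List.pyGetD_natCast] at hv
      exact h2 j.toNat (by omega) (by omega) hv

theorem bMarkRow_length (D : List (List Int)) (j : Int) (js : List Int) :
    ∀ acc, (bMarkRow D j js acc).length = acc.length := by
  induction js with
  | nil => intro acc; rfl
  | cons i is ih =>
    intro acc
    simp only [bMarkRow, ih]
    split <;> simp [PySem.List.length_pySetD]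

theorem bMarkRow_getD (D : List (List Int)) (j : Int) (js : List Int)
    (hjs : ∀ i ∈ js, 0 ≤ i) :
    ∀ acc (k : Nat), k < acc.length →
      ((bMarkRow D j js acc).getD k false = true ↔
        (acc.getD k false = true ∧
          ∀ i ∈ js, i = (k : Int) →
            ((k : Int) = j ∨ PySem.List.pyGetD (PySem.List.pyGetD D j []) (k : Int) 0 ≠ 1))) := by
  induction js with
  | nil => intro acc k hk; simp [bMarkRow]
  | cons i is ih =>
    intro acc k hk
    have hi0 : (0 : Int) ≤ i := hjs i (by simp)
    have hjs' : ∀ x ∈ is, (0 : Int) ≤ x := fun x hx => hjs x (List.mem_cons_of_mem _ hx)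
    simp only [bMarkRow]
    have hlen : (if i ≠ j ∧ PySem.List.pyGetD (PySem.List.pyGetD D j []) i 0 = 1
        then PySem.List.pySetD acc i false else acc).length = acc.length := by
      split <;> simp [PySem.List.length_pySetD]
    rw [ih hjs' _ k (by rw [hlen]; exact hk)]
    have hstep : ((if i ≠ j ∧ PySem.List.pyGetD (PySem.List.pyGetD D j []) i 0 = 1
        then PySem.List.pySetD acc i false else acc).getD k false = true) ↔
        (acc.getD k false = true ∧ (i = (k : Int) →
          ((k : Int) = j ∨ PySem.List.pyGetD (PySem.List.pyGetD D j []) (k : Int) 0 ≠ 1))) := by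
      split
      · rename_i hcond
        rw [PySem.List.pySetD_of_nonneg acc false hi0]
        by_cases hik : i = (k : Int)
        · have hkt : i.toNat = k := by omega
          rw [hkt]
          have e2 : (acc.set k false).getD k false = false := by
            rw [List.getD_eq_getElem?_getD, List.getElem?_set_self hk]; rfl
          rw [e2]
          refine iff_of_false (by simp) ?_
          rintro ⟨-, himp⟩
          rcases himp hik with hj | hx1
          · exact hcond.1 (by omega)
          · rw [hik] at hcond
            exact hx1 hcond.2
        · have hne : i.toNat ≠ k := by omega
          have e2 : (acc.set i.toNat false).getD k false = acc.getD k false := by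
            rw [List.getD_eq_getElem?_getD, List.getElem?_set_ne hne,
                ← List.getD_eq_getElem?_getD]
          rw [e2]
          exact ⟨fun ha => ⟨ha, fun h => absurd h hik⟩, fun h => h.1⟩
      · rename_i hcond
        push_neg at hcond
        constructor
        · intro ha
          refine ⟨ha, fun hik => ?_⟩
          by_cases hij : i = j
          · exact Or.inl (by rw [← hik, hij])
          · right
            rw [← hik]
            exact hcond hij
        · exact fun h => h.1
    rw [hstep, List.forall_mem_cons]
    tauto

theorem bOuterMark_getD (D : List (List Int)) (js : List Int) :
    ∀ acc (k : Nat), k < acc.length →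
      ((bOuterMark D js acc).getD k false = true ↔
        (acc.getD k false = true ∧
          ∀ j ∈ js, ((k : Int) < PySem.List.len D →
            ((k : Int) = j ∨ PySem.List.pyGetD (PySem.List.pyGetD D j []) (k : Int) 0 ≠ 1)))) := by
  induction js with
  | nil => intro acc k hk; simp [bOuterMark]
  | cons j js ih =>
    intro acc k hk
    simp only [bOuterMark]
    rw [ih _ k (by rw [bMarkRow_length]; exact hk)]
    rw [bMarkRow_getD D j _ (fun i hi => (PySem.List.mem_pyRange_one.mp hi).1) acc k hk]
    have hhead : (∀ i ∈ PySem.List.pyRange 0 (PySem.List.len D) 1, i = (k : Int) →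
          ((k : Int) = j ∨ PySem.List.pyGetD (PySem.List.pyGetD D j []) (k : Int) 0 ≠ 1)) ↔
        ((k : Int) < PySem.List.len D →
          ((k : Int) = j ∨ PySem.List.pyGetD (PySem.List.pyGetD D j []) (k : Int) 0 ≠ 1)) := by
      constructor
      · intro hall hklt
        exact hall ((k : Nat) : Int)
          (PySem.List.mem_pyRange_one.mpr ⟨Int.natCast_nonneg k, hklt⟩) rfl
      · intro himp i hi hik
        rw [hik] at hi
        exact himp (PySem.List.mem_pyRange_one.mp hi).2
    rw [hhead, List.forall_mem_cons]
    tauto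

theorem bRowOk_iff (D : List (List Int)) (i : Int) (js : List Int) :
    bRowOk D i js = true ↔
      ∀ j ∈ js, (j = i ∨ PySem.List.pyGetD (PySem.List.pyGetD D i []) j 0 ≠ 0) := by
  induction js with
  | nil => simp [bRowOk]
  | cons j js ih =>
    simp only [bRowOk, Bool.and_eq_true, Bool.or_eq_true, decide_eq_true_eq]
    rw [ih, List.forall_mem_cons]

theorem bAny_iff (D : List (List Int)) (flags : List Bool) (js : List Int) :
    bAny D flags js = true ↔
      ∃ i ∈ js, PySem.List.pyGetD flags i false = true ∧
        bRowOk D i (PySem.List.pyRange 0 (PySem.List.len D) 1) = true := by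
  induction js with
  | nil => simp [bAny]
  | cons i is ih =>
    simp only [bAny, Bool.or_eq_true, Bool.and_eq_true]
    rw [ih]
    constructor
    · rintro (⟨hf, hr⟩ | ⟨a, ha, hp⟩)
      · exact ⟨i, by simp, hf, hr⟩
      · exact ⟨a, List.mem_cons_of_mem _ ha, hp⟩
    · rintro ⟨a, ha, hp⟩
      rcases List.mem_cons.mp ha with rfl | ha'
      · exact Or.inl hp
      · exact Or.inr ⟨a, ha', hp⟩

theorem B_iff (D : List (List Int)) :
    has_source_vertex_alt D = true ↔ ∃ i < D.length, isSrc D i := by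
  unfold has_source_vertex_alt
  rw [bAny_iff]
  simp only [PySem.List.len_eq]
  constructor
  · rintro ⟨i, hi, hf, hr⟩
    rw [PySem.List.mem_pyRange_one] at hi
    obtain ⟨hi0, hin⟩ := hi
    have hicast : i = ((i.toNat : Nat) : Int) := by omega
    refine ⟨i.toNat, by omega, ?_, ?_⟩
    · intro j hj hji h0
      rw [bRowOk_iff] at hr
      have hmem : ((j : Nat) : Int) ∈ PySem.List.pyRange 0 (D.length : Int) 1 := by
        rw [PySem.List.mem_pyRange_one]; omega
      have hx := hr _ hmem
      rw [hicast] at hx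
      simp only [PySem.List.pyGetD_natCast] at hx
      rcases hx with h | h
      · omega
      · exact h h0
    · intro j hj hji h1
      rw [hicast, PySem.List.pyGetD_natCast] at hf
      rw [bOuterMark_getD D _ _ i.toNat (by simp; omega)] at hf
      obtain ⟨-, hcol⟩ := hf
      have hmem : ((j : Nat) : Int) ∈ PySem.List.pyRange 0 (D.length : Int) 1 := by
        rw [PySem.List.mem_pyRange_one]; omega
      have hx := hcol _ hmem (by simp only [PySem.List.len_eq]; omega)
      simp only [PySem.List.pyGetD_natCast] at hx
      rcases hx with h | h
      · omega
      · exact h h1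
  · rintro ⟨k, hk, h1, h2⟩
    refine ⟨(k : Int), by rw [PySem.List.mem_pyRange_one]; omega, ?_, ?_⟩
    · rw [PySem.List.pyGetD_natCast]
      rw [bOuterMark_getD D _ _ k (by simp; omega)]
      refine ⟨by simp [List.getD_eq_getElem?_getD, hk], ?_⟩
      intro j hjmem hklt
      rw [PySem.List.mem_pyRange_one] at hjmem
      by_cases hkj : (k : Int) = j
      · exact Or.inl hkj
      · right
        have hjcast : j = ((j.toNat : Nat) : Int) := by omega
        rw [hjcast]
        simp only [PySem.List.pyGetD_natCast]
        exact h2 j.toNat (by omega) (by omega)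
    · rw [bRowOk_iff]
      intro j hjmem
      rw [PySem.List.mem_pyRange_one] at hjmem
      by_cases hji : j = (k : Int)
      · exact Or.inl hji
      · right
        have hjcast : j = ((j.toNat : Nat) : Int) := by omega
        rw [hjcast]
        simp only [PySem.List.pyGetD_natCast]
        exact h1 j.toNat (by omega) (by omega)

-- ===== VERDICT (by name: the statement is the Claim_ definition above) =====
theorem has_source_vertex_spec : Claim_equal_has_source_vertex := by
  intro D _ _
  unfold Spec_has_source_vertex
  have hA := A_iff D
  have hB := B_iff D
  by_cases hs : ∃ i < D.length, isSrc D i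
  · exact (hA.mpr hs).trans (hB.mpr hs).symm
  · have h1 : has_source_vertex D = false :=
      Bool.eq_false_iff.mpr (fun h => hs (hA.mp h))
    have h2 : has_source_vertex_alt D = false :=
      Bool.eq_false_iff.mpr (fun h => hs (hB.mp h))
    rw [h1, h2]
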